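-- pv_equiv track=rewrite | github.com/j0rd1smit/obsidian-kanban-parser | src/obsidian_kanban_parser/utils/parsing_utils.py | _indent_newlines
-- ===== SOURCE A (Python) =====
-- def _indent_newlines(s: str, use_tab: bool = False, indent: str | None = None) -> str:
--     """Mirror of indentNewLines(): indent continuation lines with 4 spaces (or tab).
--
--     Blank continuation lines are kept blank (no trailing indent added).
--     """
--     if indent is None:
--         indent = "\t" if use_tab else "    "
--     lines = s.strip().split("\n")
--     result = [lines[0]]
--     for line in lines[1:]:
--         result.append(f"{indent}{line}" if line else "")
--     return "\n".join(result)
-- ===== SOURCE B (Python) =====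
-- def _indent_newlines(s: str, use_tab: bool = False, indent: str | None = None) -> str:
--     """Single character-scan: emit the indent after each newline that is
--     followed by a non-newline character; no split/join."""
--     if indent is None:
--         indent = "\t" if use_tab else "    "
--     out = []
--     prev_nl = False
--     for ch in s.strip():
--         if prev_nl and ch != "\n":
--             out.append(indent)
--         out.append(ch)
--         prev_nl = ch == "\n"
--     return "".join(out)
-- ===== Notes on version B (the rewrite author's own statement) =====
-- stated objective: alternative
-- what changed: Replaces split-on-newline / rebuild-list / join with a single left-to-right character scan that inserts the indent after each newline followed by a non-newline character.
import Mathlib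
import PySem

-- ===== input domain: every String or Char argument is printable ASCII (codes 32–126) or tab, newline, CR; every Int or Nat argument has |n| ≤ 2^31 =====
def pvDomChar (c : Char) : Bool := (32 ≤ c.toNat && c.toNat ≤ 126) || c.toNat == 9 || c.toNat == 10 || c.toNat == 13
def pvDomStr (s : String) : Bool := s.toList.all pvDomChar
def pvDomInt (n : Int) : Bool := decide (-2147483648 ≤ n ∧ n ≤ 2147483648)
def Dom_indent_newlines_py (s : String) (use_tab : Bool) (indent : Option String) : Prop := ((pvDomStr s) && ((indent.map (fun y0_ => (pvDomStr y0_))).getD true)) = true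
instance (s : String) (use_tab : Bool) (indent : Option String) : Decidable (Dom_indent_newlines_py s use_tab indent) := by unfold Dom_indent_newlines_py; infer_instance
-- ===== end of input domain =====

-- B replaces A's split/rebuild/join with a single character scan (alternative decomposition, same O(n) cost).
-- ===== PORT A =====
-- A: strip, split on "\n", indent every nonempty continuation line, rejoin.
def indent_newlines_py (s : String) (use_tab : Bool) (indent : Option String) : String :=
  let ind : List Char :=
    (match indent with
     | none => if use_tab then "\t" else "    "
     | some i => i).toList
  let lines := PySem.Chars.splitOn (PySem.Chars.strip s.toList) ['\n']
  match lines with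
  | [] => ""  -- unreachable: split never returns an empty list
  | l0 :: rest =>
    let result := rest.foldl
      (fun acc line => acc ++ [if line ≠ [] then ind ++ line else []]) [l0]
    String.ofList (PySem.Chars.join ['\n'] result)

-- ===== PORT B =====
-- B: one left-to-right character scan inserting the indent after each
-- newline that is followed by a non-newline character.
def indent_newlines_py_alt (s : String) (use_tab : Bool) (indent : Option String) : String :=
  let ind : List Char :=
    (match indent with
     | none => if use_tab then "\t" else "    "
     | some i => i).toList
  let res := (PySem.Chars.strip s.toList).foldl
    (fun (st : List Char × Bool) ch =>
      ((if st.2 && ch != '\n' then st.1 ++ ind else st.1) ++ [ch], ch == '\n'))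
    ([], false)
  String.ofList res.1

-- ===== PRECONDITION & SPEC =====
def Spec_indent_newlines_py (s : String) (use_tab : Bool) (indent : Option String) (out : String) : Prop := out = indent_newlines_py_alt s use_tab indent
instance (s : String) (use_tab : Bool) (indent : Option String) (out : String) : Decidable (Spec_indent_newlines_py s use_tab indent out) := by unfold Spec_indent_newlines_py; infer_instance

-- ===== CLAIM (what is proved, stated in full; the proofs are below) =====
def Claim_equal_indent_newlines_py : Prop := ∀ (s : String) (use_tab : Bool) (indent : Option String), Dom_indent_newlines_py s use_tab indent → Spec_indent_newlines_py s use_tab indent (indent_newlines_py s use_tab indent)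

-- ===== LEMMAS AND PROOFS =====

-- split of cs on '\n' as (first line, remaining lines)
def pvSplitNl : List Char → List Char × List (List Char)
  | [] => ([], [])
  | c :: r =>
    let p := pvSplitNl r
    if c = '\n' then ([], p.1 :: p.2) else (c :: p.1, p.2)

-- B's scan as a structural recursion
def pvScan (ind : List Char) : Bool → List Char → List Char
  | _, [] => []
  | prev, c :: r => (if prev && c != '\n' then ind else []) ++ c :: pvScan ind (c == '\n') r

lemma pvGo_spec (fuel : Nat) : ∀ (l cur acc), l.length < fuel →
    PySem.Chars.splitOn.go ['\n'] fuel l cur acc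
      = acc.reverse ++ (cur.reverse ++ (pvSplitNl l).1) :: (pvSplitNl l).2 := by
  induction fuel with
  | zero => intro l cur acc h; omega
  | succ n ih =>
    intro l cur acc h
    cases l with
    | nil => simp [PySem.Chars.splitOn.go, pvSplitNl]
    | cons c r =>
      rw [PySem.Chars.splitOn.go]
      by_cases hc : c = '\n'
      · subst hc
        rw [if_pos (by simp [List.isPrefixOf])]
        have hd : List.drop (['\n'] : List Char).length ('\n' :: r) = r := rfl
        rw [hd, ih r [] (List.reverse cur :: acc) (by simpa using Nat.lt_of_succ_lt_succ h)]
        simp [pvSplitNl]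
      · rw [if_neg (by simp [List.isPrefixOf]; exact fun h2 => hc h2.symm)]
        rw [ih r (c :: cur) acc (by simpa using Nat.lt_of_succ_lt_succ h)]
        simp [pvSplitNl, hc]

lemma pvSplitOn_eq (cs : List Char) :
    PySem.Chars.splitOn cs ['\n'] = (pvSplitNl cs).1 :: (pvSplitNl cs).2 := by
  unfold PySem.Chars.splitOn
  rw [pvGo_spec (cs.length + 1) cs [] [] (by omega)]
  simp

lemma pvFoldl_scan (ind : List Char) (cs : List Char) : ∀ (acc : List Char) (prev : Bool),
    (cs.foldl (fun (st : List Char × Bool) ch =>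
      ((if st.2 && ch != '\n' then st.1 ++ ind else st.1) ++ [ch], ch == '\n')) (acc, prev)).1
    = acc ++ pvScan ind prev cs := by
  induction cs with
  | nil => intro acc prev; simp [pvScan]
  | cons c r ih =>
    intro acc prev
    simp only [List.foldl_cons, pvScan]
    rw [ih]
    by_cases hp : (prev && c != '\n') = true <;> simp [hp]

lemma pvScan_true (ind : List Char) (cs : List Char) :
    pvScan ind true cs
      = (match cs with | [] => [] | c :: _ => if c != '\n' then ind else []) ++ pvScan ind false cs := by
  cases cs with
  | nil => simp [pvScan]
  | cons c r => simp [pvScan]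

lemma pvSplitNl_head (ind : List Char) (cs : List Char) :
    (match cs with | [] => [] | c :: _ => if c != '\n' then ind else []) ++ (pvSplitNl cs).1
      = (if (pvSplitNl cs).1 ≠ [] then ind ++ (pvSplitNl cs).1 else []) := by
  cases cs with
  | nil => simp [pvSplitNl]
  | cons c r =>
    by_cases hc : c = '\n'
    · subst hc; simp [pvSplitNl]
    · simp [pvSplitNl, hc]

lemma pvScan_eq (ind : List Char) (cs : List Char) :
    pvScan ind false cs
      = (pvSplitNl cs).1
        ++ ((pvSplitNl cs).2.map
              (fun l => '\n' :: (if l ≠ [] then ind ++ l else []))).flatten := by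
  induction cs with
  | nil => simp [pvScan, pvSplitNl]
  | cons c r ih =>
    by_cases hc : c = '\n'
    · subst hc
      rw [show pvScan ind false ('\n' :: r) = '\n' :: pvScan ind true r from by
        simp [pvScan]]
      rw [pvScan_true, ih]
      rw [show pvSplitNl ('\n' :: r) = ([], (pvSplitNl r).1 :: (pvSplitNl r).2) from by
        simp [pvSplitNl]]
      simp only [List.map_cons, List.flatten_cons, List.nil_append, List.cons_append]
      rw [← List.append_assoc, pvSplitNl_head ind r]
    · rw [show pvScan ind false (c :: r) = c :: pvScan ind (c == '\n') r from by
        simp [pvScan]]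
      rw [show ((c == '\n') = false) from by simp [hc], ih]
      rw [show pvSplitNl (c :: r) = (c :: (pvSplitNl r).1, (pvSplitNl r).2) from by
        simp [pvSplitNl, hc]]
      simp

lemma pvJoin_cons (h : List Char) (t : List (List Char)) :
    PySem.Chars.join ['\n'] (h :: t) = h ++ (t.map (fun l => '\n' :: l)).flatten := by
  induction t generalizing h with
  | nil => simp [PySem.Chars.join, List.intercalate]
  | cons x xs ih =>
    rw [PySem.Chars.join_cons_cons, ih x]
    simp

lemma pvMain (ind cs : List Char) :
    PySem.Chars.join ['\n']
      ((pvSplitNl cs).2.foldl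
        (fun acc line => acc ++ [if line ≠ [] then ind ++ line else []]) [(pvSplitNl cs).1])
    = (cs.foldl (fun (st : List Char × Bool) ch =>
        ((if st.2 && ch != '\n' then st.1 ++ ind else st.1) ++ [ch], ch == '\n')) ([], false)).1 := by
  rw [pvFoldl_scan, List.nil_append, pvScan_eq]
  rw [PySem.List.foldl_append_singleton_eq_map, List.singleton_append]
  rw [pvJoin_cons]
  rw [List.map_map]
  rfl

-- ===== VERDICT (by name: the statement is the Claim_ definition above) =====
theorem indent_newlines_py_spec : Claim_equal_indent_newlines_py := by
  intro s use_tab indent _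
  unfold Spec_indent_newlines_py indent_newlines_py indent_newlines_py_alt
  rw [pvSplitOn_eq]
  exact congrArg String.ofList (pvMain _ _)
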